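-- pv_equiv track=rewrite | github.com/megatrommendes/MegaPetz | Model/DAO/FuncoesAuxiliares/FormataCPF.py | formata_cpf
-- ===== SOURCE A (Python) =====
-- def formata_cpf(text):
--     # Remove caracteres não numéricos
--     text = ''.join(filter(str.isdigit, text))
--     if len(text) > 14:
--         # Limita o tamanho do texto
--         text = text[:14]
--     formatted_text = ''
--     for i in range(len(text)):
--         if i == 3:
--             formatted_text += '.' + text[i]
--         elif i == 6:
--             formatted_text += '.' + text[i]
--         elif i == 9:
--             formatted_text += '-' + text[i]
--         else:
--             formatted_text += text[i]
--     return formatted_text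
-- ===== SOURCE B (Python) =====
-- def formata_cpf(text):
--     d = ''.join(c for c in text if c.isdigit())[:14]
--     out = d[:3]
--     if len(d) > 3:
--         out += '.' + d[3:6]
--     if len(d) > 6:
--         out += '.' + d[6:9]
--     if len(d) > 9:
--         out += '-' + d[9:]
--     return out
-- ===== Notes on version B (the rewrite author's own statement) =====
-- stated objective: simpler
-- what changed: Replaced the per-character loop with index-dispatch branches at positions 3, 6 and 9 by a fixed-segment slice decomposition: take the digit string truncated to 14, emit the first three digits and conditionally append each later segment with its dot or dash separator.
import Mathlib
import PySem

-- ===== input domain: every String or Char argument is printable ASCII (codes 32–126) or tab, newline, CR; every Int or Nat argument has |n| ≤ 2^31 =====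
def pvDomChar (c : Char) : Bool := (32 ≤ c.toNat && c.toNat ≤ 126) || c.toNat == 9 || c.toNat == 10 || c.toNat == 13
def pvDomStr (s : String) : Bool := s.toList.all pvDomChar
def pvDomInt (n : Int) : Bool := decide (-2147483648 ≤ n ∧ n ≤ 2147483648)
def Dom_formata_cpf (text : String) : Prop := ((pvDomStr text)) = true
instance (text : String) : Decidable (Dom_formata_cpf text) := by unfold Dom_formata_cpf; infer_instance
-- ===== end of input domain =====

-- B replaces A's per-character loop with index-dispatch branches by a fixed-segment slice
-- decomposition (objective: simpler); return values agree on every input.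

-- ===== PORT A =====
-- the loop indexes text[i] with i ∈ range(len(text)), always in range, so getD is exact
def formata_cpf (text : String) : String :=
  let t := text.toList.filter PySem.Chars.isdigit
  let t := if 14 < t.length then t.take 14 else t   -- text[:14] with nonneg bound = take
  let r := (List.range t.length).foldl (fun acc i =>
    if i == 3 then acc ++ ['.', t.getD i ' ']
    else if i == 6 then acc ++ ['.', t.getD i ' ']
    else if i == 9 then acc ++ ['-', t.getD i ' ']
    else acc ++ [t.getD i ' ']) []
  String.ofList r

-- ===== PORT B =====
def formata_cpf_alt (text : String) : String :=
  let d := (text.toList.filter PySem.Chars.isdigit).take 14   -- [:14]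
  let out := d.take 3
  let out := if 3 < d.length then out ++ '.' :: (d.drop 3).take 3 else out
  let out := if 6 < d.length then out ++ '.' :: (d.drop 6).take 3 else out
  let out := if 9 < d.length then out ++ '-' :: d.drop 9 else out
  String.ofList out

-- ===== PRECONDITION & SPEC =====
def Spec_formata_cpf (text : String) (out : String) : Prop := out = formata_cpf_alt text
instance (text : String) (out : String) : Decidable (Spec_formata_cpf text out) := by unfold Spec_formata_cpf; infer_instance

-- ===== CLAIM (what is proved, stated in full; the proofs are below) =====
def Claim_equal_formata_cpf : Prop := ∀ (text : String), Dom_formata_cpf text → Spec_formata_cpf text (formata_cpf text)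

-- ===== LEMMAS AND PROOFS =====

-- the loop of A and the segment decomposition of B agree on any digit list of length ≤ 14
set_option maxHeartbeats 4000000 in
lemma fcpf_key (t : List Char) (h : t.length ≤ 14) :
    (List.range t.length).foldl (fun acc i =>
      if i == 3 then acc ++ ['.', t.getD i ' ']
      else if i == 6 then acc ++ ['.', t.getD i ' ']
      else if i == 9 then acc ++ ['-', t.getD i ' ']
      else acc ++ [t.getD i ' ']) [] =
    (let out := t.take 3
     let out := if 3 < t.length then out ++ '.' :: (t.drop 3).take 3 else out
     let out := if 6 < t.length then out ++ '.' :: (t.drop 6).take 3 else out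
     if 9 < t.length then out ++ '-' :: t.drop 9 else out) := by
  rcases t with _|⟨a0,_|⟨a1,_|⟨a2,_|⟨a3,_|⟨a4,_|⟨a5,_|⟨a6,_|⟨a7,_|⟨a8,_|⟨a9,_|⟨a10,_|⟨a11,_|⟨a12,_|⟨a13,t⟩⟩⟩⟩⟩⟩⟩⟩⟩⟩⟩⟩⟩⟩
  case cons.cons.cons.cons.cons.cons.cons.cons.cons.cons.cons.cons.cons.cons =>
    have ht : t = [] := by
      simp only [List.length_cons] at h
      exact List.eq_nil_of_length_eq_zero (by omega)
    subst ht
    simp [List.range_succ]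
  all_goals simp [List.range_succ]

theorem formata_cpf_spec : Claim_equal_formata_cpf := by
  intro text _
  unfold Spec_formata_cpf formata_cpf formata_cpf_alt
  by_cases h14 : 14 < (text.toList.filter PySem.Chars.isdigit).length
  · simp only [h14, if_pos]
    exact congrArg String.ofList (fcpf_key _ (by simp))
  · simp only [h14, if_neg, not_false_iff]
    rw [List.take_of_length_le (by omega)]
    exact congrArg String.ofList (fcpf_key _ (by omega))
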